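-- pv_equiv track=rewrite | github.com/DireLines/hobby | midiParsing.py | trimToInterval
-- ===== SOURCE A (Python) =====
-- def trimToInterval(events,startTime,duration):
-- 	startIndex = 0
-- 	startHasBeenFound = False
-- 	stopIndex = 0
-- 	i = 0
-- 	while(i < len(events)):
-- 		if not (startHasBeenFound == True) and events[i][1] >= startTime:
-- 			startHasBeenFound = True
-- 			startIndex = i
-- 		if events[i][1] > duration + startTime:
-- 			stopIndex = i
-- 			i = len(events)
-- 		i += 1
-- 	return events[startIndex:stopIndex]
-- ===== SOURCE B (Python) =====
-- def trimToInterval(events, startTime, duration):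
--     end = startTime + duration
--     for stop, e in enumerate(events):
--         if e[1] > end:
--             start = next((i for i, x in enumerate(events[:stop + 1]) if x[1] >= startTime), 0)
--             return events[start:stop]
--     return []  # no event lies past the interval's end: the interval is not fully covered
-- ===== Notes on version B (the rewrite author's own statement) =====
-- stated objective: simpler
-- what changed: A's fused while-loop that threads startIndex/startHasBeenFound/stopIndex flag state and breaks by setting i=len(events) is replaced by an early-return search for the first event past the interval end plus one declarative first-index search (next over enumerate) for the start boundary within that prefix.
import Mathlib
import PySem

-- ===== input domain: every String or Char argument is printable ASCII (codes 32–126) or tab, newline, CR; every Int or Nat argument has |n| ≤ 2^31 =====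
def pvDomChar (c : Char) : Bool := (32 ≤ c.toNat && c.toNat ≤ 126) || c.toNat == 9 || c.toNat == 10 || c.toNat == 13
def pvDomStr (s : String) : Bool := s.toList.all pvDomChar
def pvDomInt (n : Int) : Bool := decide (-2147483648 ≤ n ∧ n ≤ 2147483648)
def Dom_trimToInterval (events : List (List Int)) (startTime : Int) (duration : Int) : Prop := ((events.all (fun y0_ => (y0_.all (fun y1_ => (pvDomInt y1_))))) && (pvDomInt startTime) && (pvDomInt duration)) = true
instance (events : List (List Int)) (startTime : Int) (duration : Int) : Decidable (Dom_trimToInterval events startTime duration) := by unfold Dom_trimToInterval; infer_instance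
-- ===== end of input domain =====

-- ===== PORT A =====
-- B replaces A's fused flag-state while-loop by an early-return search for the stop boundary
-- plus one declarative first-index search for the start boundary (objective: simpler);
-- the equivalence is about return values; Pre_ excludes exactly the inputs where Python raises IndexError.

-- e[1]: exact wherever the Python programs actually evaluate it (Pre_ guarantees those events have length ≥ 2)
def pvTime (e : List Int) : Int := e.getD 1 0

-- the while loop of A: state (startIndex, startHasBeenFound, stopIndex), index i; the
-- 'i = len(events)' break returns (startIndex, i) directly; fuel = len(events) - i makes it structural
def trimLoop (events : List (List Int)) (startTime : Int) (duration : Int) :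
    Nat → Nat → Nat → Bool → Nat → Nat × Nat
  | 0, _, startIndex, _, stopIndex => (startIndex, stopIndex)
  | fuel+1, i, startIndex, found, stopIndex =>
    if i < events.length then
      let t := pvTime (events.getD i [])
      let fs := if !found && decide (t ≥ startTime) then (true, i) else (found, startIndex)
      if t > duration + startTime then (fs.2, i)
      else trimLoop events startTime duration fuel (i+1) fs.2 fs.1 stopIndex
    else (startIndex, stopIndex)

def trimToInterval (events : List (List Int)) (startTime : Int) (duration : Int) : List (List Int) :=
  let p := trimLoop events startTime duration events.length 0 0 false 0
  PySem.List.slice events (some (p.1 : Int)) (some (p.2 : Int))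

-- ===== PORT B =====
-- the 'for stop, e in enumerate(events): if e[1] > end: … return …' loop of B, with its early return
def trimScan (events : List (List Int)) (startTime : Int) (endT : Int) :
    List (List Int) → Nat → List (List Int)
  | [], _ => []
  | e :: rest, stop =>
    if pvTime e > endT then
      -- start = next((i for i,x in enumerate(events[:stop+1]) if x[1] >= startTime), 0)
      let start := ((events.take (stop + 1)).findIdx? (fun x => decide (pvTime x ≥ startTime))).getD 0
      PySem.List.slice events (some (start : Int)) (some (stop : Int))
    else trimScan events startTime endT rest (stop + 1)

def trimToInterval_alt (events : List (List Int)) (startTime : Int) (duration : Int) : List (List Int) :=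
  let endT := startTime + duration
  trimScan events startTime endT events 0

-- ===== PRECONDITION & SPEC =====
-- Pre_ excludes exactly the inputs on which Python A raises IndexError: some event of
-- length < 2 is reached by the scan, i.e. no earlier event (of length ≥ 2) already
-- stopped the scan by exceeding startTime + duration.
def Pre_trimToInterval (events : List (List Int)) (startTime : Int) (duration : Int) : Prop :=
  ∀ i < events.length, (events.getD i []).length < 2 →
    ∃ j < i, 2 ≤ (events.getD j []).length ∧ (events.getD j []).getD 1 0 > startTime + duration
instance (events : List (List Int)) (startTime : Int) (duration : Int) : Decidable (Pre_trimToInterval events startTime duration) := by unfold Pre_trimToInterval; infer_instance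

def pvWitness_trimToInterval : List (List Int) × Int × Int := ([[0, 2], [1, 5], [2, 9]], 3, 4)

def Spec_trimToInterval (events : List (List Int)) (startTime : Int) (duration : Int) (out : List (List Int)) : Prop := out = trimToInterval_alt events startTime duration
instance (events : List (List Int)) (startTime : Int) (duration : Int) (out : List (List Int)) : Decidable (Spec_trimToInterval events startTime duration out) := by unfold Spec_trimToInterval; infer_instance

-- ===== CLAIM (what is proved, stated in full; the proofs are below) =====
def Claim_equal_trimToInterval : Prop := ∀ (events : List (List Int)) (startTime : Int) (duration : Int), Dom_trimToInterval events startTime duration → Pre_trimToInterval events startTime duration → Spec_trimToInterval events startTime duration (trimToInterval events startTime duration)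

-- ===== LEMMAS AND PROOFS =====

-- What A's loop computes from position i, expressed through first-index searches
lemma trimLoop_spec (events : List (List Int)) (st d : Int) :
    ∀ (n i sI : Nat) (found : Bool) (stI : Nat), events.length - i ≤ n →
    trimLoop events st d n i sI found stI =
      match (events.drop i).findIdx? (fun e => decide (d + st < pvTime e)) with
      | some k =>
          ((if found then sI else
             match ((events.drop i).take (k+1)).findIdx? (fun e => decide (st ≤ pvTime e)) with
             | some q => i + q | none => sI), i + k)
      | none =>
          ((if found then sI else
             match (events.drop i).findIdx? (fun e => decide (st ≤ pvTime e)) with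
             | some q => i + q | none => sI), stI) := by
  intro n
  induction n with
  | zero =>
    intro i sI found stI hn
    simp [trimLoop, List.drop_eq_nil_of_le (by omega : events.length ≤ i)]
  | succ n ih =>
    intro i sI found stI hn
    by_cases hi : i < events.length
    · have hdrop : events.drop i = events[i] :: events.drop (i+1) := List.drop_eq_getElem_cons hi
      have hgetD : events.getD i [] = events[i] := by simp [List.getD, hi]
      rw [trimLoop]
      simp only [hi, if_pos, hgetD, hdrop, List.findIdx?_cons, ge_iff_le, gt_iff_lt]
      by_cases hP : d + st < pvTime events[i]
      · -- the stop branch: break with stopIndex = i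
        rw [if_pos (by exact_mod_cast hP)]
        simp only [hP, decide_true, List.take_succ_cons, List.findIdx?_cons]
        by_cases hQ : st ≤ pvTime events[i] <;> cases found <;>
          simp [hQ]
      · -- continue: apply the induction hypothesis at i+1
        rw [if_neg (by exact_mod_cast hP)]
        rw [ih (i+1) _ _ stI (by omega)]
        simp only [hP, decide_false]
        by_cases hQ : st ≤ pvTime events[i] <;> cases found <;>
          simp only [hQ, decide_true, decide_false, Bool.not_true, Bool.not_false,
            Bool.true_and, Bool.false_and, if_true, if_false, Bool.false_eq_true] <;>
        · cases hfp : (events.drop (i+1)).findIdx? (fun e => decide (d + st < pvTime e)) with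
          | none =>
            simp only [Option.map_none]
            try cases hfq : (events.drop (i+1)).findIdx? (fun e => decide (st ≤ pvTime e)) with
            | none => simp
            | some q => simp; try omega
          | some k =>
            simp only [Option.map_some, List.take_succ_cons, List.findIdx?_cons]
            cases hfq : ((events.drop (i+1)).take (k+1)).findIdx? (fun e => decide (st ≤ pvTime e)) with
            | none => simp [hQ]; try omega
            | some q => simp [hQ]; try omega
    · rw [trimLoop]
      simp [hi, List.drop_eq_nil_of_le (by omega : events.length ≤ i)]

-- What B's scan computes from position i, in the same first-index form
lemma trimScan_spec (events : List (List Int)) (st endT : Int) :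
    ∀ (l : List (List Int)) (i : Nat), l = events.drop i →
    trimScan events st endT l i =
      match (events.drop i).findIdx? (fun e => decide (endT < pvTime e)) with
      | some k =>
          PySem.List.slice events
            (some ((((events.take (i + k + 1)).findIdx? (fun x => decide (st ≤ pvTime x))).getD 0 : Nat) : Int))
            (some ((i + k : Nat) : Int))
      | none => [] := by
  intro l
  induction l with
  | nil =>
    intro i hl
    rw [trimScan, ← hl]
    simp
  | cons e rest ih =>
    intro i hl
    rw [trimScan, ← hl]
    simp only [List.findIdx?_cons, gt_iff_lt, ge_iff_le]
    by_cases hP : endT < pvTime e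
    · simp [hP]
    · have hrest : rest = events.drop (i+1) := by
        have hi : i < events.length := by
          by_contra h
          simp [List.drop_eq_nil_of_le (by omega : events.length ≤ i)] at hl
        have := List.drop_eq_getElem_cons hi
        rw [this] at hl
        exact (List.cons.injEq _ _ _ _ ▸ hl).2
      rw [ih (i+1) hrest, hrest]
      simp only [hP, decide_false]
      cases hfp : (events.drop (i+1)).findIdx? (fun e => decide (endT < pvTime e)) with
      | none => simp
      | some k =>
        simp [show i + 1 + k = i + (k + 1) from by omega]

-- ===== VERDICT (by name: the statement is the Claim_ definition above) =====
theorem trimToInterval_spec : Claim_equal_trimToInterval := by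
  intro events st d _hDom _hPre
  unfold Spec_trimToInterval trimToInterval trimToInterval_alt
  simp only [(Int.add_comm st d : st + d = d + st)]
  rw [trimLoop_spec events st d events.length 0 0 false 0 (by omega)]
  rw [trimScan_spec events st (d + st) events 0 (by simp)]
  simp only [List.drop_zero, Nat.zero_add]
  cases hfp : events.findIdx? (fun e => decide (d + st < pvTime e)) with
  | none =>
    -- A: stopIndex stays 0, the slice events[s:0] is empty; B: returns []
    simp only [Bool.false_eq_true, if_false]
    cases hfq : events.findIdx? (fun e => decide (st ≤ pvTime e)) with
    | none => rw [PySem.List.slice_natCast]; simp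
    | some q => rw [PySem.List.slice_natCast]; simp
  | some k =>
    simp only [Bool.false_eq_true, if_false]
    cases hfq : (events.take (k+1)).findIdx? (fun e => decide (st ≤ pvTime e)) with
    | none => simp
    | some q => simp
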